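-- pv_equiv track=rewrite | github.com/vediyappanm/gitops | src/monitor.py | _extract_failure_reason
-- ===== SOURCE A (Python) =====
-- def _extract_failure_reason(logs: str) -> str:
--     """Extract failure reason from workflow logs"""
--     # Simple heuristic-based extraction
--     lines = logs.split('\n')
--
--     # Look for common error patterns
--     error_keywords = [
--         "error", "failed", "timeout", "exception", "fatal",
--         "panic", "segmentation fault", "out of memory"
--     ]
--
--     for line in lines:
--         lower_line = line.lower()
--         for keyword in error_keywords:
--             if keyword in lower_line:
--                 return line.strip()[:200]  # Return first 200 chars
--
--     # If no specific error found, return last non-empty line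
--     for line in reversed(lines):
--         if line.strip():
--             return line.strip()[:200]
--
--     return "Unknown failure reason"
-- ===== SOURCE B (Python) =====
-- def _extract_failure_reason(logs: str) -> str:
--     """Extract failure reason from workflow logs (single forward pass)."""
--     error_keywords = [
--         "error", "failed", "timeout", "exception", "fatal",
--         "panic", "segmentation fault", "out of memory"
--     ]
--     last_nonempty = None
--     for line in logs.split('\n'):
--         lower_line = line.lower()
--         if any(keyword in lower_line for keyword in error_keywords):
--             return line.strip()[:200]
--         if line.strip():
--             last_nonempty = line
--     if last_nonempty is not None:
--         return last_nonempty.strip()[:200]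
--     return "Unknown failure reason"
-- ===== Notes on version B (the rewrite author's own statement) =====
-- stated objective: alternative
-- what changed: Replaces A's two scans (forward keyword search plus a second reversed scan for the last non-empty line) with one forward pass that returns on the first keyword hit while tracking the last non-empty line as fallback state.
import Mathlib
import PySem

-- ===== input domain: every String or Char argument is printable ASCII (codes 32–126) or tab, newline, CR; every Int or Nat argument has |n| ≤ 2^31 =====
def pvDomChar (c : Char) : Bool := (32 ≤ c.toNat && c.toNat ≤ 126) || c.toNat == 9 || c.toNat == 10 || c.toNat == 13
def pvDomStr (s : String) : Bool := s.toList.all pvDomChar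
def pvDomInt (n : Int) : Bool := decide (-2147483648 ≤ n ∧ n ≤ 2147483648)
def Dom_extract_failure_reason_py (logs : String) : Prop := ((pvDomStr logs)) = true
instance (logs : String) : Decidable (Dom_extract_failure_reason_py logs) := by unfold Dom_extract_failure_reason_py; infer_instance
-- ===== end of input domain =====

-- B replaces A's two scans (forward keyword search + reversed fallback scan) with one
-- forward pass that tracks the last non-empty line as fallback state; same value everywhere.

-- ===== PORT A =====
def pvKeywords : List String :=
  ["error", "failed", "timeout", "exception", "fatal",
   "panic", "segmentation fault", "out of memory"]

-- first loop of A: first line containing a keyword (case-insensitively), stripped and cut to 200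
def pvA_err : List String → Option String
  | [] => none
  | line :: rest =>
    if pvKeywords.any (fun k => PySem.Str.isIn k (PySem.Str.lower line)) then
      some (PySem.Str.slice (PySem.Str.strip line) none (some 200))
    else pvA_err rest

-- second loop of A, applied to the reversed list: first line with truthy strip
def pvA_last : List String → Option String
  | [] => none
  | line :: rest =>
    if PySem.Str.strip line ≠ "" then
      some (PySem.Str.slice (PySem.Str.strip line) none (some 200))
    else pvA_last rest

def extract_failure_reason_py (logs : String) : String :=
  let lines := (PySem.Str.split? logs "\n").getD []   -- sep "\n" ≠ "": split? is always some
  match pvA_err lines with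
  | some r => r
  | none =>
    match pvA_last lines.reverse with
    | some r => r
    | none => "Unknown failure reason"

-- ===== PORT B =====
-- after the loop: return last_nonempty.strip()[:200] if tracked, else the default
def pvB_finish : Option String → String
  | some l => PySem.Str.slice (PySem.Str.strip l) none (some 200)
  | none => "Unknown failure reason"

-- the single forward pass of Source B, carrying the last non-empty line seen so far
def pvB_loop : List String → Option String → String
  | [], last => pvB_finish last
  | line :: rest, last =>
    if pvKeywords.any (fun k => PySem.Str.isIn k (PySem.Str.lower line)) then
      PySem.Str.slice (PySem.Str.strip line) none (some 200)
    else
      pvB_loop rest (if PySem.Str.strip line ≠ "" then some line else last)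

def extract_failure_reason_py_alt (logs : String) : String :=
  pvB_loop ((PySem.Str.split? logs "\n").getD []) none

-- ===== PRECONDITION & SPEC =====
def Spec_extract_failure_reason_py (logs : String) (out : String) : Prop := out = extract_failure_reason_py_alt logs
instance (logs : String) (out : String) : Decidable (Spec_extract_failure_reason_py logs out) := by unfold Spec_extract_failure_reason_py; infer_instance

-- ===== CLAIM (what is proved, stated in full; the proofs are below) =====
def Claim_equal_extract_failure_reason_py : Prop := ∀ (logs : String), Dom_extract_failure_reason_py logs → Spec_extract_failure_reason_py logs (extract_failure_reason_py logs)

-- ===== LEMMAS AND PROOFS =====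

-- appending a line at the end of the reversed-scan input: it is consulted only if nothing before matched
theorem pvA_last_append (xs : List String) (l : String) :
    pvA_last (xs ++ [l]) =
      match pvA_last xs with
      | some r => some r
      | none =>
        if PySem.Str.strip l ≠ "" then
          some (PySem.Str.slice (PySem.Str.strip l) none (some 200))
        else none := by
  induction xs with
  | nil => simp [pvA_last]
  | cons x xs ih =>
    by_cases h : PySem.Str.strip x ≠ ""
    · simp [pvA_last, h]
    · simp only [List.cons_append, pvA_last, if_neg h]
      exact ih

-- B's loop computes A's composite: keyword search first, then the reversed fallback, then the accumulator
theorem pvB_loop_eq (lines : List String) (last : Option String) :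
    pvB_loop lines last =
      match pvA_err lines with
      | some r => r
      | none =>
        match pvA_last lines.reverse with
        | some r => r
        | none => pvB_finish last := by
  induction lines generalizing last with
  | nil => simp [pvB_loop, pvA_err, pvA_last]
  | cons line rest ih =>
    simp only [pvB_loop, pvA_err, List.reverse_cons]
    by_cases h : (pvKeywords.any fun k => PySem.Str.isIn k (PySem.Str.lower line)) = true
    · rw [if_pos h, if_pos h]
    · rw [if_neg h, if_neg h, ih, pvA_last_append]
      by_cases hs : PySem.Str.strip line ≠ "" <;>
        [simp only [if_pos hs]; simp only [if_neg hs]] <;>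
        rcases pvA_err rest with _ | r <;> rcases pvA_last rest.reverse with _ | r' <;>
        simp [pvB_finish]

-- ===== VERDICT (by name: the statement is the Claim_ definition above) =====
theorem extract_failure_reason_py_spec : Claim_equal_extract_failure_reason_py := by
  intro logs _
  unfold Spec_extract_failure_reason_py extract_failure_reason_py extract_failure_reason_py_alt
  rw [pvB_loop_eq]
  rfl
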